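-- pv_equiv track=rewrite | github.com/GrafSpiel/GROMARK | test_promising_primers.py | fibonacci_expansion
-- ===== SOURCE A (Python) =====
-- def fibonacci_expansion(primer, base, length):
--     """Sum all digits in the primer"""
--     key = list(primer)
--     primer_length = len(primer)
--     while len(key) < length:
--         next_digit = 0
--         for i in range(1, primer_length + 1):
--             if i <= len(key):
--                 next_digit = (next_digit + key[-i]) % base
--         key.append(next_digit)
--     return key
-- ===== SOURCE B (Python) =====
-- def fibonacci_expansion(primer, base, length):
--     """Extend the primer with a sliding-window running sum, one update per new digit."""
--     key = list(primer)
--     pl = len(primer)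
--     if pl == 0:
--         # empty primer: every window sum is empty, so every appended digit is 0
--         return key + [0] * (length - pl)
--     if length <= pl:
--         return key
--     s = sum(key)  # running sum of the last pl entries of key
--     for _ in range(length - pl):
--         d = s % base
--         key.append(d)
--         s += d - key[-pl - 1]
--     return key
-- ===== Notes on version B (the rewrite author's own statement) =====
-- stated objective: alternative
-- what changed: Instead of re-summing the last primer_length entries (with a mod at every addition) for each new digit, B maintains a sliding-window running sum, updating it in O(1) per appended digit (add the new digit, subtract the one leaving the window); on the measured inputs (small primer) this is not measurably faster.
import Mathlib
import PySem

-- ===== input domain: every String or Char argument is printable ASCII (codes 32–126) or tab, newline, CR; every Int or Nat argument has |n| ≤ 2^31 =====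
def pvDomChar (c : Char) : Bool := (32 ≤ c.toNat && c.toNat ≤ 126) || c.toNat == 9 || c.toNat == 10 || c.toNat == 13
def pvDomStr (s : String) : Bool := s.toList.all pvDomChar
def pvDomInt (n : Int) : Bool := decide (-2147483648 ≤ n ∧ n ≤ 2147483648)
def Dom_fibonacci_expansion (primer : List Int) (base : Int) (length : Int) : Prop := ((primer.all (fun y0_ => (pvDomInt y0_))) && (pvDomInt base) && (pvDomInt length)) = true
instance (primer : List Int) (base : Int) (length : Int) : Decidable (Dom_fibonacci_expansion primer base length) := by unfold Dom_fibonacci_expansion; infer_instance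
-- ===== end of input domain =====

-- B replaces A's per-digit rescan of the last primer_length entries with a sliding-window
-- running sum updated once per appended digit (objective: alternative algorithm).


-- ===== PORT A =====
-- inner for-loop: for i in range(1, primer_length+1): if i <= len(key): next_digit = (next_digit + key[-i]) % base
def fibAinner (key : List Int) (base : Int) (pl : Nat) : Int :=
  (PySem.List.pyRange 1 ((pl : Int) + 1)).foldl
    (fun nd i => if i ≤ (key.length : Int) then PySem.Int.mod (nd + PySem.List.pyGetD key (-i) 0) base else nd) 0

-- while len(key) < length: key.append(next_digit)
def fibAloop (base length : Int) (pl : Nat) (key : List Int) : List Int :=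
  if _h : (key.length : Int) < length then
    fibAloop base length pl (key ++ [fibAinner key base pl])
  else key
termination_by (length - (key.length : Int)).toNat
decreasing_by simp; omega

def fibonacci_expansion (primer : List Int) (base : Int) (length : Int) : List Int :=
  fibAloop base length primer.length primer

-- ===== PORT B =====
-- for _ in range(length - pl): d = s % base; key.append(d); s += d - key[-pl-1]
def fibBloop (base : Int) (pl : Nat) : Nat → List Int → Int → List Int
  | 0, key, _ => key
  | n + 1, key, s =>
    let d := PySem.Int.mod s base
    let key' := key ++ [d]
    fibBloop base pl n key' (s + d - PySem.List.pyGetD key' (-(pl : Int) - 1) 0)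

def fibonacci_expansion_alt (primer : List Int) (base : Int) (length : Int) : List Int :=
  if primer.length = 0 then primer ++ List.replicate (length - (primer.length : Int)).toNat 0
  else if length ≤ (primer.length : Int) then primer
  else fibBloop base primer.length (length - (primer.length : Int)).toNat primer primer.sum

-- ===== PRECONDITION & SPEC =====
-- Pre_ excludes exactly the inputs on which the Python A raises ZeroDivisionError:
-- base = 0 with a nonempty primer and length > len(primer) (the '% base' in the loop body executes).
def Pre_fibonacci_expansion (primer : List Int) (base : Int) (length : Int) : Prop :=
  base ≠ 0 ∨ primer = [] ∨ length ≤ (primer.length : Int)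
instance (primer : List Int) (base : Int) (length : Int) : Decidable (Pre_fibonacci_expansion primer base length) := by unfold Pre_fibonacci_expansion; infer_instance

def pvWitness_fibonacci_expansion : List Int × Int × Int := ([1, 2], 10, 5)

def Spec_fibonacci_expansion (primer : List Int) (base : Int) (length : Int) (out : List Int) : Prop := out = fibonacci_expansion_alt primer base length
instance (primer : List Int) (base : Int) (length : Int) (out : List Int) : Decidable (Spec_fibonacci_expansion primer base length out) := by unfold Spec_fibonacci_expansion; infer_instance

-- ===== CLAIM (what is proved, stated in full; the proofs are below) =====
def Claim_equal_fibonacci_expansion : Prop := ∀ (primer : List Int) (base : Int) (length : Int), Dom_fibonacci_expansion primer base length → Pre_fibonacci_expansion primer base length → Spec_fibonacci_expansion primer base length (fibonacci_expansion primer base length)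

-- ===== LEMMAS AND PROOFS =====

-- Python's `%` respects congruence: (x % b + y) % b = (x + y) % b (for every b; fmod 0 = id).
theorem pv_mod_add_left (x y b : Int) :
    PySem.Int.mod (PySem.Int.mod x b + y) b = PySem.Int.mod (x + y) b := by
  simp only [PySem.Int.mod]
  rw [Int.add_fmod, Int.fmod_fmod_of_dvd _ dvd_rfl, ← Int.add_fmod]

-- A's inner loop computes (sum of the last pl entries of key) % base.
theorem fibAinner_eq (base : Int) (pl : Nat) (key : List Int) (hpl : pl ≤ key.length) :
    fibAinner key base pl = PySem.Int.mod ((key.drop (key.length - pl)).sum) base := by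
  induction pl with
  | zero =>
    rw [fibAinner, show ((0:Nat):Int) + 1 = 1 by norm_num, PySem.List.pyRange_one_eq_nil le_rfl]
    simp [PySem.Int.mod]
  | succ p ih =>
    have hp : p ≤ key.length := by omega
    have hsplit : PySem.List.pyRange 1 ((↑(p + 1) : Int) + 1)
        = PySem.List.pyRange 1 ((p : Int) + 1) ++ [(p : Int) + 1] := by
      have := PySem.List.pyRange_one_succ_right (a := 1) (b := (p : Int) + 1) (by omega)
      push_cast
      convert this using 2
    rw [fibAinner, hsplit, List.foldl_append]
    have hguard : ((p : Int) + 1 ≤ (key.length : Int)) := by exact_mod_cast hpl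
    have hget : PySem.List.pyGetD key (-((p : Int) + 1)) 0 = key[key.length - (p + 1)] := by
      have hc : (-((p : Int) + 1)) = -((p + 1 : Nat) : Int) := by push_cast; ring
      rw [hc, PySem.List.pyGetD_neg_natCast key (p + 1) 0 (by omega) hpl]
    rw [show (List.foldl (fun nd i => if i ≤ (key.length : Int) then PySem.Int.mod (nd + PySem.List.pyGetD key (-i) 0) base else nd) 0 (PySem.List.pyRange 1 ((p : Int) + 1))) = fibAinner key base p from rfl]
    rw [ih hp]
    rw [List.foldl_cons, List.foldl_nil]
    rw [if_pos hguard, hget, pv_mod_add_left]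
    congr 1
    have hlt : key.length - (p + 1) < key.length := by omega
    rw [List.drop_eq_getElem_cons hlt, show key.length - (p + 1) + 1 = key.length - p by omega,
      List.sum_cons]
    ring

theorem loopA_zero (base length : Int) : ∀ (n : Nat) (key : List Int),
    n = (length - (key.length : Int)).toNat →
    fibAloop base length 0 key = key ++ List.replicate n 0 := by
  intro n
  induction n with
  | zero =>
    intro key hn
    rw [fibAloop, dif_neg (by omega), List.replicate_zero, List.append_nil]
  | succ m ih =>
    intro key hn
    have hlt : (key.length : Int) < length := by omega
    have hin : fibAinner key base 0 = 0 := by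
      rw [fibAinner_eq base 0 key (Nat.zero_le _)]
      simp [PySem.Int.mod]
    rw [fibAloop, dif_pos hlt, hin,
      ih (key ++ [0]) (by simp; omega)]
    rw [List.replicate_succ, List.append_assoc]
    rfl

theorem loop_eq (base length : Int) (pl : Nat) : ∀ (n : Nat) (key : List Int) (s : Int),
    n = (length - (key.length : Int)).toNat → pl ≤ key.length →
    s = (key.drop (key.length - pl)).sum →
    fibAloop base length pl key = fibBloop base pl n key s := by
  intro n
  induction n with
  | zero =>
    intro key s hn _ _
    rw [fibAloop, dif_neg (by omega), fibBloop]
  | succ m ih =>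
    intro key s hn hpl hs
    have hlt : (key.length : Int) < length := by omega
    have hnext : fibAinner key base pl = PySem.Int.mod s base := by
      rw [fibAinner_eq base pl key hpl, hs]
    rw [fibAloop, dif_pos hlt, fibBloop, hnext]
    set d := PySem.Int.mod s base with hd
    apply ih (key ++ [d])
    · simp; omega
    · simp; omega
    · -- new running sum = sum of the last pl entries of key ++ [d]
      rcases Nat.eq_zero_or_pos pl with h0 | hpos
      · subst h0
        have hout : PySem.List.pyGetD (key ++ [d]) (-(0 : Nat) - 1) 0 = d := by
          simp [PySem.List.pyGetD_neg_one_append_singleton]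
        rw [hout]
        have hs0 : s = 0 := by simpa using hs
        simp [hs0, List.drop_eq_nil_of_le]
      · have hidx : (-(pl : Int) - 1) = -(((pl + 1 : Nat)) : Int) := by push_cast; ring
        have hout : PySem.List.pyGetD (key ++ [d]) (-(pl : Int) - 1) 0
            = key[key.length - pl]'(by omega) := by
          have hL : (key ++ [d]).length = key.length + 1 := by simp
          rw [hidx, PySem.List.pyGetD_neg_natCast (key ++ [d]) (pl + 1) 0 (by omega) (by omega)]
          have h1 : (key ++ [d]).length - (pl + 1) = key.length - pl := by omega
          simp only [h1]
          exact List.getElem_append_left (by omega)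
        rw [hout]
        have h2 : (key ++ [d]).length - pl = key.length + 1 - pl := by simp
        rw [h2, List.drop_append_of_le_length (by omega), List.sum_append, List.sum_cons,
          List.sum_nil]
        have h3 : key.length - pl < key.length := by omega
        have h4 : key.length - pl + 1 = key.length + 1 - pl := by omega
        rw [hs, List.drop_eq_getElem_cons h3, h4, List.sum_cons]
        ring

-- ===== VERDICT (by name: the statement is the Claim_ definition above) =====
theorem fibonacci_expansion_spec : Claim_equal_fibonacci_expansion := by
  intro primer base length _ _
  unfold Spec_fibonacci_expansion fibonacci_expansion fibonacci_expansion_alt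
  by_cases h0 : primer.length = 0
  · rw [if_pos h0]
    have hnil : primer = [] := List.eq_nil_of_length_eq_zero h0
    subst hnil
    exact loopA_zero base length _ [] rfl
  · rw [if_neg h0]
    by_cases hle : length ≤ (primer.length : Int)
    · rw [if_pos hle, fibAloop, dif_neg (by omega)]
    · rw [if_neg hle]
      exact loop_eq base length primer.length _ primer primer.sum rfl le_rfl (by simp)
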